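-- pv_equiv track=rewrite | github.com/smallwanderer/smallwanderer-bkjhub | 프로그래머스/3/84021. 퍼즐 조각 채우기/퍼즐 조각 채우기.py | solution
-- ===== SOURCE A (Python) =====
-- from collections import Counter
--
-- DIR4 = [(1,0), (-1,0), (0,1), (0,-1)]
--
-- def puzzle_detector(board, target):
--     """board에서 값이 target인 연결 컴포넌트(좌표)를 반환"""
--     H, W = len(board), len(board[0])
--     visited = [[False]*W for _ in range(H)]
--     comps = []
--
--     for col in range(H):
--         for row in range(W):
--             if visited[col][row] or board[col][row] != target:
--                 continue
--
--             stack = [(col, row)]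
--             visited[col][row] = True
--             comp = []
--
--             while stack:
--                 cy, cx = stack.pop()
--                 comp.append((cy, cx))
--
--                 for dy, dx in DIR4:
--                     ny, nx = cy + dy, cx + dx
--                     if 0 <= ny < H and 0 <= nx < W:
--                         if not visited[ny][nx] and board[ny][nx] == target:
--                             visited[ny][nx] = True
--                             stack.append((ny, nx))
--
--             comps.append(comp)
--
--     return comps
--
-- def puzzle_normalize(points):
--     miny = min(y for y, x in points)
--     minx = min(x for y, x in points)
--     shifted = [(y-miny, x-minx) for y, x in points]
--     return tuple(sorted(shifted))
--
-- def puzzle_canonicalize(puzzle: list) -> list: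
--     # 매 회전마다 좌표계가 바뀜 -> 따라서 회전하고 normalization을 수행해야 함.
--     pts = puzzle[:]
--     cands = []
--     for _ in range(4):
--         cands.append(puzzle_normalize(pts))
--         pts = [(-x, y) for y, x in pts] # 매회 90도 회전 -> 좌표가 음수로 바뀜 (0, 0)으로 다시 맞춰야함.
--     return min(cands)
--
-- def solution(game_board, table):
--     # game_board = [[1, 0], [1, 1]]
--     # table = [[0, 1], [1, 1]]
--     holes = [puzzle_canonicalize(comp) for comp in puzzle_detector(game_board, 0)]
--     blocks = [puzzle_canonicalize(comp) for comp in puzzle_detector(table, 1)]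
--
--     hole_cnt = Counter(holes)
--     answer = 0
--
--     for b in blocks:
--         if hole_cnt[b] > 0:
--             hole_cnt[b] -= 1
--             answer += len(b)
--
--     return answer
-- ===== SOURCE B (Python) =====
-- # B: same flood-fill component detection, but canonicalization rotates clockwise with the
-- # four rotations written out, the per-piece minima are found in one fused pass, and the
-- # multiset matching of holes against blocks is done by sorting both lists of canonical
-- # pieces once and running a two-pointer merge instead of a Counter.
--
-- DIR4 = [(1, 0), (-1, 0), (0, 1), (0, -1)]
--
-- def puzzle_detector(board, target):
--     """board에서 값이 target인 연결 컴포넌트(좌표)를 반환"""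
--     H, W = len(board), len(board[0])
--     visited = [[False] * W for _ in range(H)]
--     comps = []
--     for col in range(H):
--         for row in range(W):
--             if visited[col][row] or board[col][row] != target:
--                 continue
--             stack = [(col, row)]
--             visited[col][row] = True
--             comp = []
--             while stack:
--                 cy, cx = stack.pop()
--                 comp.append((cy, cx))
--                 for dy, dx in DIR4:
--                     ny, nx = cy + dy, cx + dx
--                     if 0 <= ny < H and 0 <= nx < W:
--                         if not visited[ny][nx] and board[ny][nx] == target:
--                             visited[ny][nx] = True
--                             stack.append((ny, nx))
--             comps.append(comp)
--     return comps
--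
-- def puzzle_normalize(points):
--     # both minima in one pass
--     miny, minx = points[0]
--     for y, x in points[1:]:
--         if y < miny:
--             miny = y
--         if x < minx:
--             minx = x
--     return tuple(sorted((y - miny, x - minx) for y, x in points))
--
-- def puzzle_canonicalize(puzzle):
--     # the four rotations written out, turning clockwise
--     r1 = [(x, -y) for y, x in puzzle]
--     r2 = [(x, -y) for y, x in r1]
--     r3 = [(x, -y) for y, x in r2]
--     return min([puzzle_normalize(puzzle), puzzle_normalize(r1),
--                 puzzle_normalize(r2), puzzle_normalize(r3)])
--
-- def solution(game_board, table):
--     holes = sorted(puzzle_canonicalize(c) for c in puzzle_detector(game_board, 0))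
--     blocks = sorted(puzzle_canonicalize(c) for c in puzzle_detector(table, 1))
--     answer = 0
--     i = j = 0
--     while i < len(holes) and j < len(blocks):
--         if holes[i] < blocks[j]:
--             i += 1
--         elif blocks[j] < holes[i]:
--             j += 1
--         else:
--             answer += len(blocks[j])
--             i += 1
--             j += 1
--     return answer
-- ===== Notes on version B (the rewrite author's own statement) =====
-- stated objective: alternative
-- what changed: The per-piece normalization finds both minima in one fused pass, the four rotations are unrolled clockwise instead of an iterated counterclockwise rotation loop, and the Counter-based multiset matching of holes against blocks is replaced by sorting both canonical-piece lists and counting matches with a two-pointer merge.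
import Mathlib
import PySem

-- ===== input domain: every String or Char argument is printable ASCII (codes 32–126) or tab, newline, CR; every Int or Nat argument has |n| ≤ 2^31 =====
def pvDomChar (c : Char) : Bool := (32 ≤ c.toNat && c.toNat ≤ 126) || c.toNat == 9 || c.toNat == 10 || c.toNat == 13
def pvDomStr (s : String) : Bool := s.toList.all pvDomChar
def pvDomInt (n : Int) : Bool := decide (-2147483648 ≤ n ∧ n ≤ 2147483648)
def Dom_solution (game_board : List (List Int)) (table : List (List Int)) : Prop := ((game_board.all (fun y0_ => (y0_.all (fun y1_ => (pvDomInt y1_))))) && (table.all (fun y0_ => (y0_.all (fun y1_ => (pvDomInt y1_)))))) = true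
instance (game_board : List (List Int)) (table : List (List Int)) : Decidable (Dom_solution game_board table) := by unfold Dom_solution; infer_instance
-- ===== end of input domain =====

-- B keeps A's flood-fill component detection but fuses the per-piece minimum scan into one
-- pass, unrolls the four (clockwise) rotations, and replaces the Counter-based multiset
-- matching by sorting both canonical-piece lists once and counting with a two-pointer merge.

-- ===== PORT A =====
-- Shared exact helpers (both Pythons contain the identical flood-fill detector and both call
-- Python's tuple comparison via sorted/min/< ; ported once, used by both ports).

-- Python's `<` on (int, int) tuples (lexicographic); hand-ported, exact.
def pairLt (p q : Int × Int) : Bool := p.1 < q.1 || (p.1 == q.1 && p.2 < q.2)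

-- Python's `<` on tuples of (int, int) tuples (lexicographic); hand-ported, exact.
def coordsLt : List (Int × Int) → List (Int × Int) → Bool
  | [], [] => false
  | [], _ :: _ => true
  | _ :: _, [] => false
  | p :: ps, q :: qs => if p = q then coordsLt ps qs else pairLt p q

-- Python's min(cands) over a nonempty list of coordinate tuples (first minimal element;
-- hand-ported, exact — never called on []; [] result unreachable).
def pyMinCoords : List (List (Int × Int)) → List (Int × Int)
  | [] => []
  | x :: t => t.foldl (fun m c => if coordsLt c m then c else m) x

def DIR4 : List (Int × Int) := [(1, 0), (-1, 0), (0, 1), (0, -1)]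

-- visited[y][x] / board[y][x]; only evaluated under the 0 ≤ y < H, 0 ≤ x < W guards.
def vget (visited : List (List Bool)) (y x : Int) : Bool :=
  PySem.List.pyGetD (PySem.List.pyGetD visited y []) x false
def vset (visited : List (List Bool)) (y x : Int) : List (List Bool) :=
  PySem.List.pySetD visited y (PySem.List.pySetD (PySem.List.pyGetD visited y []) x true)
def bget (board : List (List Int)) (y x : Int) : Int :=
  PySem.List.pyGetD (PySem.List.pyGetD board y []) x 0

-- the `while stack:` loop; the stack is kept top-first (Python's list end = our head, so
-- pop()/append() are head operations — same elements, same order of processing), with fuel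
-- (H*W)+1, enough for every run since each push marks one cell visited.
def floodLoop (board : List (List Int)) (target : Int) (H W : Int) :
    Nat → List (List Bool) → List (Int × Int) → List (Int × Int) →
    List (List Bool) × List (Int × Int)
  | 0, visited, _, comp => (visited, comp)
  | fuel + 1, visited, stack, comp =>
    match stack with
    | [] => (visited, comp)
    | (cy, cx) :: rest =>
      let comp' := comp ++ [(cy, cx)]
      let vs := DIR4.foldl (fun (vs : List (List Bool) × List (Int × Int)) d =>
          let ny := cy + d.1
          let nx := cx + d.2
          if 0 ≤ ny ∧ ny < H ∧ 0 ≤ nx ∧ nx < W then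
            if ¬ vget vs.1 ny nx ∧ bget board ny nx = target then
              (vset vs.1 ny nx, (ny, nx) :: vs.2)
            else vs
          else vs) (visited, rest)
      floodLoop board target H W fuel vs.1 vs.2 comp'

def puzzleDetector (board : List (List Int)) (target : Int) : List (List (Int × Int)) :=
  let H := PySem.List.len board
  let W := PySem.List.len (PySem.List.pyGetD board 0 [])
  let fuel := (H * W).toNat + 1
  ((PySem.List.pyRange 0 H 1).foldl
    (fun (st : List (List Bool) × List (List (Int × Int))) col =>
      (PySem.List.pyRange 0 W 1).foldl
        (fun (st : List (List Bool) × List (List (Int × Int))) row =>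
          if vget st.1 col row || bget board col row ≠ target then st
          else
            let visited := vset st.1 col row
            let r := floodLoop board target H W fuel visited [(col, row)] []
            (r.1, st.2 ++ [r.2])) st)
    (List.replicate H.toNat (List.replicate W.toNat false), [])).2

def rotCCW (pts : List (Int × Int)) : List (Int × Int) := pts.map (fun p => (-p.2, p.1))

-- A's puzzle_normalize; min() raises on [] — only ever called on nonempty components.
def normalizeA (points : List (Int × Int)) : List (Int × Int) :=
  let miny := (PySem.List.min? (points.map (·.1)) (fun y => y)).getD 0
  let minx := (PySem.List.min? (points.map (·.2)) (fun y => y)).getD 0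
  PySem.List.sorted2 (points.map (fun p => (p.1 - miny, p.2 - minx))) (·.1) (·.2)

-- A's puzzle_canonicalize: rotate counterclockwise four times, collecting normalizations.
def canonicalizeA (puzzle : List (Int × Int)) : List (Int × Int) :=
  let st := (List.range 4).foldl
    (fun (st : List (List (Int × Int)) × List (Int × Int)) _ =>
      (st.1 ++ [normalizeA st.2], rotCCW st.2)) ([], puzzle)
  pyMinCoords st.1

def solution (game_board : List (List Int)) (table : List (List Int)) : Int :=
  let holes := (puzzleDetector game_board 0).map canonicalizeA
  let blocks := (puzzleDetector table 1).map canonicalizeA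
  let st := blocks.foldl
    (fun (st : PySem.Dict (List (Int × Int)) Int × Int) b =>
      if 0 < st.1.getD b 0 then (st.1.insert b (st.1.getD b 0 - 1), st.2 + PySem.List.len b)
      else st)
    (PySem.Dict.counter holes, 0)
  st.2

-- ===== PORT B =====
def rotCW (pts : List (Int × Int)) : List (Int × Int) := pts.map (fun p => (p.2, -p.1))

-- B's puzzle_normalize: both minima in one fused pass; points[0] raises on [] — only ever
-- called on nonempty components ([] branch unreachable).
def normalizeB (points : List (Int × Int)) : List (Int × Int) :=
  match points with
  | [] => []
  | p :: rest =>
    let m := rest.foldl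
      (fun (m : Int × Int) q =>
        (if q.1 < m.1 then q.1 else m.1, if q.2 < m.2 then q.2 else m.2)) p
    PySem.List.sorted2 (points.map (fun q => (q.1 - m.1, q.2 - m.2))) (·.1) (·.2)

def canonicalizeB (puzzle : List (Int × Int)) : List (Int × Int) :=
  let r1 := rotCW puzzle
  let r2 := rotCW r1
  let r3 := rotCW r2
  pyMinCoords [normalizeB puzzle, normalizeB r1, normalizeB r2, normalizeB r3]

-- Source B's sorted(...) on lists of coordinate tuples: Python's stable sort, as the insertion
-- sort PySem.List.insertBy with Python's tuple `<` (coordsLt).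
def sortCoords (xs : List (List (Int × Int))) : List (List (Int × Int)) :=
  xs.foldl (fun acc x => PySem.List.insertBy coordsLt x acc) []

-- B's two-pointer merge loop over the two sorted lists (the i/j index walk, structurally).
def mergeCount : List (List (Int × Int)) → List (List (Int × Int)) → Int
  | [], _ => 0
  | _ :: _, [] => 0
  | h :: hs, b :: bs =>
    if coordsLt h b then mergeCount hs (b :: bs)
    else if coordsLt b h then mergeCount (h :: hs) bs
    else PySem.List.len b + mergeCount hs bs

def solution_alt (game_board : List (List Int)) (table : List (List Int)) : Int :=
  let holes := sortCoords ((puzzleDetector game_board 0).map canonicalizeB)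
  let blocks := sortCoords ((puzzleDetector table 1).map canonicalizeB)
  mergeCount holes blocks

-- ===== PRECONDITION & SPEC =====
-- Pre_ excludes exactly the inputs where Python A raises IndexError: an empty board
-- (len(board[0])) or a board whose later row is shorter than row 0 (board[col][row]).
def Pre_solution (game_board : List (List Int)) (table : List (List Int)) : Prop :=
  game_board ≠ [] ∧ table ≠ [] ∧
  (∀ row ∈ game_board, (game_board.headD []).length ≤ row.length) ∧
  (∀ row ∈ table, (table.headD []).length ≤ row.length)
instance (game_board : List (List Int)) (table : List (List Int)) : Decidable (Pre_solution game_board table) := by unfold Pre_solution; infer_instance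

def pvWitness_solution : List (List Int) × List (List Int) := ([[1, 0], [1, 1]], [[0, 1], [1, 1]])

def Spec_solution (game_board : List (List Int)) (table : List (List Int)) (out : Int) : Prop := out = solution_alt game_board table
instance (game_board : List (List Int)) (table : List (List Int)) (out : Int) : Decidable (Spec_solution game_board table out) := by unfold Spec_solution; infer_instance

-- ===== CLAIM (what is proved, stated in full; the proofs are below) =====
def Claim_equal_solution : Prop := ∀ (game_board : List (List Int)) (table : List (List Int)), Dom_solution game_board table → Pre_solution game_board table → Spec_solution game_board table (solution game_board table)

-- ===== LEMMAS AND PROOFS =====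

-- ---- the order coordsLt is a strict linear order ----
theorem pairLt_irrefl (p : Int × Int) : pairLt p p = false := by
  simp [pairLt]

theorem pairLt_conn {p q : Int × Int} (h1 : pairLt p q = false) (h2 : pairLt q p = false) :
    p = q := by
  simp [pairLt] at h1 h2
  obtain ⟨a, b⟩ := p; obtain ⟨c, d⟩ := q
  simp_all
  omega

theorem coordsLt_irrefl (a : List (Int × Int)) : coordsLt a a = false := by
  induction a with
  | nil => rfl
  | cons p ps ih => simp [coordsLt, ih]

theorem pairLt_trans {p q r : Int × Int} (h1 : pairLt p q = true) (h2 : pairLt q r = true) :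
    pairLt p r = true := by
  obtain ⟨a, b⟩ := p; obtain ⟨c, d⟩ := q; obtain ⟨e, f⟩ := r
  simp [pairLt] at h1 h2 ⊢
  omega

theorem coordsLt_conn : ∀ {a b : List (Int × Int)},
    coordsLt a b = false → coordsLt b a = false → a = b
  | [], [] => by intros; rfl
  | [], _ :: _ => by intro h _; simp [coordsLt] at h
  | _ :: _, [] => by intro _ h; simp [coordsLt] at h
  | p :: ps, q :: qs => by
    intro h1 h2
    by_cases hpq : p = q
    · subst hpq
      simp only [coordsLt, if_true] at h1 h2
      rw [coordsLt_conn h1 h2]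
    · exact absurd
        (pairLt_conn (by simpa [coordsLt, hpq] using h1)
          (by simpa [coordsLt, Ne.symm hpq] using h2)) hpq

theorem coordsLt_trans : ∀ {a b c : List (Int × Int)},
    coordsLt a b = true → coordsLt b c = true → coordsLt a c = true
  | [], [], _ => by intro h _; simp [coordsLt] at h
  | _ :: _, [], _ => by intro h _; simp [coordsLt] at h
  | [], _ :: _, [] => by intro _ h; simp [coordsLt] at h
  | [], _ :: _, _ :: _ => by intros; simp [coordsLt]
  | _ :: _, _ :: _, [] => by intro _ h; simp [coordsLt] at h
  | p :: ps, q :: qs, r :: rs => by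
    intro h1 h2
    simp only [coordsLt] at h1 h2 ⊢
    by_cases hpq : p = q <;> by_cases hqr : q = r
    · subst hpq; subst hqr
      rw [if_pos rfl] at h1 h2 ⊢
      exact coordsLt_trans h1 h2
    · subst hpq; rw [if_pos rfl] at h1; rw [if_neg hqr] at h2 ⊢; exact h2
    · subst hqr; rw [if_neg hpq] at h1 ⊢; rw [if_pos rfl] at h2; exact h1
    · rw [if_neg hpq] at h1; rw [if_neg hqr] at h2
      by_cases hpr : p = r
      · subst hpr
        have := pairLt_trans h1 h2
        rw [pairLt_irrefl] at this
        exact absurd this (by simp)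
      · rw [if_neg hpr]
        exact pairLt_trans h1 h2

theorem coordsLt_asymm {a b : List (Int × Int)} (h : coordsLt a b = true) :
    coordsLt b a = false := by
  by_contra hc
  have hba : coordsLt b a = true := by
    cases hh : coordsLt b a
    · exact absurd hh hc
    · rfl
  have := coordsLt_trans h hba
  rw [coordsLt_irrefl] at this
  exact absurd this (by simp)

-- ---- Python's min over a list: value determined by the set of elements ----
-- a ≤ b ≤ c chains (Le a b written coordsLt b a = false)
theorem coordsLe_trans {a b c : List (Int × Int)} (h1 : coordsLt b a = false)
    (h2 : coordsLt c b = false) : coordsLt c a = false := by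
  by_contra hc
  have hca : coordsLt c a = true := by
    cases hh : coordsLt c a
    · exact absurd hh hc
    · rfl
  rcases eq_or_ne a b with rfl | hab
  · rw [hca] at h2; exact absurd h2 (by simp)
  · have hab' : coordsLt a b = true := by
      cases hh : coordsLt a b
      · exact absurd (coordsLt_conn hh h1) hab
      · rfl
    have := coordsLt_trans hca hab'
    rw [this] at h2
    exact absurd h2 (by simp)

theorem pyMin_foldl_spec (x : List (Int × Int)) (t : List (List (Int × Int))) :
    pyMinCoords (x :: t) ∈ x :: t ∧
      ∀ y ∈ x :: t, coordsLt y (pyMinCoords (x :: t)) = false := by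
  induction t generalizing x with
  | nil =>
    refine ⟨List.mem_singleton.mpr rfl, ?_⟩
    intro y hy
    rw [List.mem_singleton.mp hy]
    exact coordsLt_irrefl _
  | cons c t ih =>
    have hstep : pyMinCoords (x :: c :: t) =
        pyMinCoords ((if coordsLt c x then c else x) :: t) := rfl
    obtain ⟨hmem, hmin⟩ := ih (if coordsLt c x then c else x)
    have hres := hmin _ List.mem_cons_self
    constructor
    · rw [hstep]
      split_ifs at hmem with hcx
      · rcases List.mem_cons.mp hmem with h | h <;> simp [hcx, h]
      · rcases List.mem_cons.mp hmem with h | h <;> simp [hcx, h]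
    · intro y hy
      rw [hstep]
      rcases List.mem_cons.mp hy with hyx | hy'
      · -- y = x
        rw [hyx]
        by_cases hcx : coordsLt c x = true
        · rw [if_pos hcx] at hres ⊢
          exact coordsLe_trans hres (coordsLt_asymm hcx)
        · rw [if_neg hcx] at hres ⊢
          exact hres
      · rcases List.mem_cons.mp hy' with hyc | hy''
        · -- y = c
          rw [hyc]
          by_cases hcx : coordsLt c x = true
          · rw [if_pos hcx] at hres ⊢
            exact hres
          · rw [if_neg hcx] at hres ⊢
            exact coordsLe_trans hres (by simpa using hcx)
        · exact hmin _ (List.mem_cons_of_mem _ hy'')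

theorem pyMin_eq_of_mem_iff {x x' : List (Int × Int)} {t t' : List (List (Int × Int))}
    (h : ∀ y, y ∈ x :: t ↔ y ∈ x' :: t') :
    pyMinCoords (x :: t) = pyMinCoords (x' :: t') := by
  obtain ⟨hm1, hmin1⟩ := pyMin_foldl_spec x t
  obtain ⟨hm2, hmin2⟩ := pyMin_foldl_spec x' t'
  exact coordsLt_conn (hmin2 _ ((h _).mp hm1)) (hmin1 _ ((h _).mpr hm2))

-- ---- normalizeB = normalizeA on nonempty lists ----
theorem foldl_pairmin (rest : List (Int × Int)) :
    ∀ p : Int × Int,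
      rest.foldl (fun (m : Int × Int) q =>
        (if q.1 < m.1 then q.1 else m.1, if q.2 < m.2 then q.2 else m.2)) p =
      ((rest.map (·.1)).foldl min p.1, (rest.map (·.2)).foldl min p.2) := by
  induction rest with
  | nil => intro p; rfl
  | cons q rest ih =>
    intro p
    have e1 : (if q.1 < p.1 then q.1 else p.1) = min p.1 q.1 := by
      rw [min_def]; split_ifs <;> omega
    have e2 : (if q.2 < p.2 then q.2 else p.2) = min p.2 q.2 := by
      rw [min_def]; split_ifs <;> omega
    rw [List.foldl_cons, List.map_cons, List.map_cons, List.foldl_cons, List.foldl_cons, ih,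
      e1, e2]

theorem normalizeB_eq (points : List (Int × Int)) (h : points ≠ []) :
    normalizeB points = normalizeA points := by
  cases points with
  | nil => exact absurd rfl h
  | cons p rest =>
    simp only [normalizeB, normalizeA]
    rw [foldl_pairmin]
    simp only [List.map_cons]
    rw [PySem.List.min?_id_cons, PySem.List.min?_id_cons]
    rfl

-- ---- canonicalizeB = canonicalizeA on nonempty lists ----
theorem rotCW_rotCW (pts : List (Int × Int)) : rotCW (rotCW pts) = rotCCW (rotCCW pts) := by
  simp [rotCW, rotCCW, List.map_map, Function.comp_def]

theorem rotCW_three (pts : List (Int × Int)) : rotCW (rotCW (rotCW pts)) = rotCCW pts := by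
  simp [rotCW, rotCCW, List.map_map, Function.comp_def]

theorem rotCW_ne_nil {pts : List (Int × Int)} (h : pts ≠ []) : rotCW pts ≠ [] := by
  simpa [rotCW] using h

theorem rotCCW_three (pts : List (Int × Int)) : rotCCW (rotCCW (rotCCW pts)) = rotCW pts := by
  simp [rotCW, rotCCW, List.map_map, Function.comp_def]

theorem canonicalizeB_eq (puzzle : List (Int × Int)) (h : puzzle ≠ []) :
    canonicalizeB puzzle = canonicalizeA puzzle := by
  have hA : canonicalizeA puzzle =
      pyMinCoords [normalizeA puzzle, normalizeA (rotCCW puzzle),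
        normalizeA (rotCCW (rotCCW puzzle)), normalizeA (rotCCW (rotCCW (rotCCW puzzle)))] := by
    rfl
  have hB : canonicalizeB puzzle =
      pyMinCoords [normalizeB puzzle, normalizeB (rotCW puzzle),
        normalizeB (rotCW (rotCW puzzle)), normalizeB (rotCW (rotCW (rotCW puzzle)))] := by
    rfl
  rw [hA, hB]
  rw [normalizeB_eq _ h, normalizeB_eq _ (rotCW_ne_nil h),
    normalizeB_eq _ (rotCW_ne_nil (rotCW_ne_nil h)),
    normalizeB_eq _ (rotCW_ne_nil (rotCW_ne_nil (rotCW_ne_nil h))),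
    rotCW_three, rotCW_rotCW, rotCCW_three]
  exact pyMin_eq_of_mem_iff (by intro y; simp; tauto)

-- ---- every component the detector returns is nonempty ----
theorem floodLoop_ne_nil (board : List (List Int)) (target : Int) (H W : Int) :
    ∀ (fuel : Nat) (visited : List (List Bool)) (stack comp : List (Int × Int)),
      comp ≠ [] → (floodLoop board target H W fuel visited stack comp).2 ≠ [] := by
  intro fuel
  induction fuel with
  | zero => intro _ _ _ h; exact h
  | succ fuel ih =>
    intro visited stack comp h
    match stack with
    | [] => exact h
    | (cy, cx) :: rest =>
      exact ih _ _ _ (by simp)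

theorem foldl_pres {α σ : Type} (P : σ → Prop) (f : σ → α → σ)
    (hstep : ∀ s x, P s → P (f s x)) : ∀ (l : List α) (s : σ), P s → P (l.foldl f s) := by
  intro l
  induction l with
  | nil => intro s h; exact h
  | cons x l ih => intro s h; exact ih _ (hstep _ _ h)

theorem floodStart_ne_nil (board : List (List Int)) (target : Int) (H W : Int)
    (fuel : Nat) (visited : List (List Bool)) (cy cx : Int) :
    (floodLoop board target H W (fuel + 1) visited [(cy, cx)] []).2 ≠ [] := by
  show (floodLoop board target H W fuel _ _ ([] ++ [(cy, cx)])).2 ≠ []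
  exact floodLoop_ne_nil board target H W fuel _ _ _ (by simp)

theorem detector_ne_nil (board : List (List Int)) (target : Int) :
    ∀ comp ∈ puzzleDetector board target, comp ≠ [] := by
  unfold puzzleDetector
  refine foldl_pres (σ := List (List Bool) × List (List (Int × Int)))
    (fun st => ∀ c ∈ st.2, c ≠ []) _ ?_ _ _ (by simp)
  intro st col hst
  refine foldl_pres (σ := List (List Bool) × List (List (Int × Int)))
    (fun st => ∀ c ∈ st.2, c ≠ []) _ ?_ _ _ hst
  intro st' row hst'
  dsimp only
  split
  · exact hst'
  · intro comp hc
    rcases List.mem_append.mp hc with hc | hc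
    · exact hst' _ hc
    · rw [List.mem_singleton.mp hc]
      exact floodStart_ne_nil board target _ _ _ _ col row

-- ---- the matching phase: both reduce to matchM ----
def matchM : List (List (Int × Int)) → List (List (Int × Int)) → Int
  | _, [] => 0
  | h, b :: bs => if b ∈ h then PySem.List.len b + matchM (h.erase b) bs else matchM h bs

theorem matchM_nil (bs : List (List (Int × Int))) : matchM [] bs = 0 := by
  induction bs with
  | nil => rfl
  | cons b bs ih => simp [matchM, ih]

-- A's Counter loop computes matchM
theorem foldA_eq_matchM :
    ∀ (bs : List (List (Int × Int))) (c : PySem.Dict (List (Int × Int)) Int)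
      (h : List (List (Int × Int))) (ans : Int),
      (∀ v, c.getD v 0 = (h.count v : Int)) →
      (bs.foldl (fun st b =>
          if 0 < st.1.getD b 0 then (st.1.insert b (st.1.getD b 0 - 1), st.2 + PySem.List.len b)
          else st) (c, ans)).2 = ans + matchM h bs := by
  intro bs
  induction bs with
  | nil => intro c h ans _; simp [matchM]
  | cons b bs ih =>
    intro c h ans hinv
    rw [List.foldl_cons]
    by_cases hb : b ∈ h
    · have hcnt : 0 < c.getD b 0 := by
        rw [hinv b]
        exact_mod_cast List.count_pos_iff.mpr hb
      rw [if_pos hcnt]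
      dsimp only
      rw [ih _ (h.erase b) _ ?_]
      · show ans + PySem.List.len b + matchM (h.erase b) bs = ans + matchM h (b :: bs)
        rw [matchM, if_pos hb, add_assoc]
      · intro v
        rw [PySem.Dict.getD_insert]
        by_cases hv : v = b
        · subst hv
          rw [if_pos rfl, hinv v, List.count_erase_self]
          have : 0 < List.count v h := List.count_pos_iff.mpr hb
          omega
        · rw [if_neg hv, hinv v, List.count_erase_of_ne hv]
    · have hcnt : ¬ 0 < c.getD b 0 := by
        rw [hinv b]
        simp [List.count_eq_zero_of_not_mem hb]
      rw [if_neg hcnt, ih _ h _ hinv, matchM, if_neg hb]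

theorem matchM_perm_left {h h' : List (List (Int × Int))} (hp : h.Perm h')
    (bs : List (List (Int × Int))) : matchM h bs = matchM h' bs := by
  induction bs generalizing h h' with
  | nil => rfl
  | cons b bs ih =>
    rw [matchM, matchM]
    by_cases hb : b ∈ h
    · rw [if_pos hb, if_pos (hp.mem_iff.mp hb), ih (hp.erase b)]
    · rw [if_neg hb, if_neg (fun hc => hb (hp.mem_iff.mpr hc)), ih hp]

theorem matchM_perm_right {bs bs' : List (List (Int × Int))} (hp : bs.Perm bs') :
    ∀ h, matchM h bs = matchM h bs' := by
  induction hp with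
  | nil => intro h; rfl
  | cons x _ ih =>
    intro h
    rw [matchM, matchM]
    by_cases hx : x ∈ h
    · rw [if_pos hx, ih, if_pos hx]
    · rw [if_neg hx, ih, if_neg hx]
  | swap x y l =>
    intro h
    rcases eq_or_ne x y with rfl | hxy
    · rfl
    · show matchM h (y :: x :: l) = matchM h (x :: y :: l)
      simp only [matchM]
      by_cases hx : x ∈ h <;> by_cases hy : y ∈ h <;>
        (simp [hx, hy, List.mem_erase_of_ne hxy, List.mem_erase_of_ne hxy.symm,
          List.erase_comm x y]; try ring)
  | trans _ _ ih1 ih2 =>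
    intro h
    rw [ih1, ih2]

theorem matchM_drop_head {h : List (Int × Int)} {t bs : List (List (Int × Int))}
    (hne : ∀ v ∈ bs, v ≠ h) : matchM (h :: t) bs = matchM t bs := by
  induction bs generalizing t with
  | nil => rfl
  | cons b bs ih =>
    have hbh : b ≠ h := hne b List.mem_cons_self
    rw [matchM, matchM]
    have hmem : b ∈ h :: t ↔ b ∈ t := by
      simp [List.mem_cons, hbh]
    by_cases hb : b ∈ t
    · rw [if_pos (hmem.mpr hb), if_pos hb,
        List.erase_cons_tail (by simpa using fun hc => hbh hc.symm),
        ih (fun v hv => hne v (List.mem_cons_of_mem _ hv))]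
    · rw [if_neg (fun hc => hb (hmem.mp hc)), if_neg hb,
        ih (fun v hv => hne v (List.mem_cons_of_mem _ hv))]

-- sortCoords sorts: a permutation, pairwise non-decreasing
theorem insertBy_perm (x : List (Int × Int)) (ys : List (List (Int × Int))) :
    (PySem.List.insertBy coordsLt x ys).Perm (x :: ys) := by
  induction ys with
  | nil => exact List.Perm.refl _
  | cons y ys ih =>
    rw [PySem.List.insertBy]
    split
    · exact List.Perm.refl _
    · exact (ih.cons y).trans (List.Perm.swap x y ys)

theorem sortCoords_foldl_perm (xs : List (List (Int × Int))) :
    ∀ acc, (xs.foldl (fun acc x => PySem.List.insertBy coordsLt x acc) acc).Perm (xs ++ acc) := by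
  induction xs with
  | nil => intro acc; simp
  | cons x xs ih =>
    intro acc
    rw [List.foldl_cons]
    exact ((ih _).trans ((insertBy_perm x acc).append_left xs)).trans
      (List.perm_middle)

theorem sortCoords_perm (xs : List (List (Int × Int))) : (sortCoords xs).Perm xs := by
  have := sortCoords_foldl_perm xs []
  simpa [sortCoords] using this

theorem insertBy_pairwise (x : List (Int × Int)) (ys : List (List (Int × Int)))
    (hp : ys.Pairwise (fun a b => coordsLt b a = false)) :
    (PySem.List.insertBy coordsLt x ys).Pairwise (fun a b => coordsLt b a = false) := by
  induction ys with
  | nil => simp [PySem.List.insertBy]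
  | cons y ys ih =>
    rw [PySem.List.insertBy]
    split
    · rename_i hxy
      refine List.Pairwise.cons ?_ hp
      intro z hz
      rcases List.mem_cons.mp hz with rfl | hz'
      · exact coordsLt_asymm hxy
      · exact coordsLe_trans (coordsLt_asymm hxy) (List.rel_of_pairwise_cons hp hz')
    · rename_i hxy
      refine List.Pairwise.cons ?_ (ih hp.tail)
      intro z hz
      rcases (PySem.List.mem_insertBy _ _ _ _).mp hz with hzx | hz'
      · rw [hzx]
        cases hh : coordsLt x y
        · rfl
        · exact absurd hh hxy
      · exact List.rel_of_pairwise_cons hp hz'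

theorem sortCoords_pairwise (xs : List (List (Int × Int))) :
    (sortCoords xs).Pairwise (fun a b => coordsLt b a = false) := by
  unfold sortCoords
  refine foldl_pres (fun acc : List (List (Int × Int)) =>
    acc.Pairwise (fun a b => coordsLt b a = false)) _ ?_ xs [] (by simp)
  intro acc x hacc
  exact insertBy_pairwise x acc hacc

theorem mergeCount_eq_matchM :
    ∀ (hs bs : List (List (Int × Int))),
      hs.Pairwise (fun a b => coordsLt b a = false) →
      bs.Pairwise (fun a b => coordsLt b a = false) →
      mergeCount hs bs = matchM hs bs := by
  intro hs bs
  induction hs, bs using mergeCount.induct with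
  | case1 bs => intro _ _; rw [matchM_nil, mergeCount]
  | case2 h hs => intro _ _; simp [mergeCount, matchM]
  | case3 h hs b bs hlt ih =>
    intro hhs hbs
    rw [mergeCount, if_pos hlt, ih hhs.tail hbs]
    refine (matchM_drop_head ?_).symm
    intro v hv
    rcases List.mem_cons.mp hv with rfl | hv'
    · intro hc
      rw [hc, coordsLt_irrefl] at hlt
      exact absurd hlt (by simp)
    · intro hc
      have := List.rel_of_pairwise_cons hbs hv'
      rw [hc] at this
      rw [hlt] at this
      exact absurd this (by simp)
  | case4 h hs b bs hnlt hlt ih =>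
    intro hhs hbs
    rw [mergeCount, if_neg hnlt, if_pos hlt, ih hhs hbs.tail, matchM]
    rw [if_neg ?_]
    intro hb
    rcases List.mem_cons.mp hb with rfl | hb'
    · rw [coordsLt_irrefl] at hlt
      exact absurd hlt (by simp)
    · have := List.rel_of_pairwise_cons hhs hb'
      rw [this] at hlt
      exact absurd hlt (by simp)
  | case5 h hs b bs hnlt1 hnlt2 ih =>
    intro hhs hbs
    have hne1 : coordsLt h b = false := by
      cases hh : coordsLt h b
      · rfl
      · exact absurd hh hnlt1
    have hne2 : coordsLt b h = false := by
      cases hh : coordsLt b h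
      · rfl
      · exact absurd hh hnlt2
    have heq : h = b := coordsLt_conn hne1 hne2
    subst heq
    rw [mergeCount, if_neg hnlt1, if_neg hnlt2, matchM, if_pos List.mem_cons_self,
      List.erase_cons_head, ih hhs.tail hbs.tail]

-- ===== VERDICT (by name: the statement is the Claim_ definition above) =====
theorem solution_spec : Claim_equal_solution := by
  intro game_board table _ _
  unfold Spec_solution solution solution_alt
  dsimp only
  have hmapG : (puzzleDetector game_board 0).map canonicalizeB
      = (puzzleDetector game_board 0).map canonicalizeA :=
    List.map_congr_left (fun c hc => canonicalizeB_eq c (detector_ne_nil game_board 0 c hc))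
  have hmapT : (puzzleDetector table 1).map canonicalizeB
      = (puzzleDetector table 1).map canonicalizeA :=
    List.map_congr_left (fun c hc => canonicalizeB_eq c (detector_ne_nil table 1 c hc))
  rw [hmapG, hmapT]
  set holes := (puzzleDetector game_board 0).map canonicalizeA with hh
  set blocks := (puzzleDetector table 1).map canonicalizeA with hb
  rw [foldA_eq_matchM blocks (PySem.Dict.counter holes) holes 0
    (fun v => PySem.Dict.getD_counter holes v), zero_add]
  rw [mergeCount_eq_matchM _ _ (sortCoords_pairwise holes) (sortCoords_pairwise blocks)]
  rw [matchM_perm_left (sortCoords_perm holes) _, matchM_perm_right (sortCoords_perm blocks) _]
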